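-- pv_equiv track=rewrite | github.com/romgenie/CompleteTech-LLC-AI-Research | src/research_orchestrator/knowledge_integration/connection_discovery.py | _find_common_neighbors
-- ===== SOURCE A (Python) =====
-- from typing import Dict, Any, List, Optional, Set, Tuple, Union
--
-- def _find_common_neighbors(
--
--     node1_id: str,
--     node2_id: str,
--     adjacency_list: Dict[str, List[Tuple[str, str, Dict[str, Any]]]]
-- ) -> Dict[str, List[str]]:
--     """Find common neighbors between two nodes.
--
--     Args:
--         node1_id: ID of the first node
--         node2_id: ID of the second node
--         adjacency_list: Adjacency list representation of the graph
--
--     Returns: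
--         Dictionary mapping neighbor IDs to lists of relationship types
--     """
--     neighbors1 = {}
--     neighbors2 = {}
--
--     # Get neighbors of node1
--     if node1_id in adjacency_list:
--         for target_id, rel_type, _ in adjacency_list[node1_id]:
--             if target_id not in neighbors1:
--                 neighbors1[target_id] = []
--             neighbors1[target_id].append(rel_type)
--
--     # Get neighbors of node2
--     if node2_id in adjacency_list:
--         for target_id, rel_type, _ in adjacency_list[node2_id]:
--             if target_id not in neighbors2:
--                 neighbors2[target_id] = []
--             neighbors2[target_id].append(rel_type)
--
--     # Find common neighbors
--     common_neighbors = {}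
--     for neighbor_id, rel_types1 in neighbors1.items():
--         if neighbor_id in neighbors2:
--             rel_types2 = neighbors2[neighbor_id]
--             common_neighbors[neighbor_id] = {
--                 "from_node1": rel_types1,
--                 "from_node2": rel_types2
--             }
--
--     return common_neighbors
-- ===== SOURCE B (Python) =====
-- def _find_common_neighbors(node1_id, node2_id, adjacency_list):
--     # Declarative re-statement: no incremental grouping dicts at all.  The
--     # common neighbors are the (deduplicated, first-occurrence-ordered)
--     # targets of node1 that also appear among node2's targets; for each such
--     # key the relationship lists are recomputed by filtering each adjacency
--     # list directly.  Correct because A's grouped dict values are exactly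
--     # these filtered projections and A's key order is first-occurrence order.
--     adj1 = adjacency_list.get(node1_id, [])
--     adj2 = adjacency_list.get(node2_id, [])
--     targets2 = {t for t, _, _ in adj2}
--     return {
--         t: {"from_node1": [r for x, r, _ in adj1 if x == t],
--             "from_node2": [r for x, r, _ in adj2 if x == t]}
--         for t in dict.fromkeys(x for x, _, _ in adj1)
--         if t in targets2
--     }
-- ===== Notes on version B (the rewrite author's own statement) =====
-- stated objective: alternative
-- what changed: B builds no grouping dicts: it takes the ordered-deduplicated targets of node1, keeps those present in node2's target set, and recomputes each relationship list by filtering the adjacency lists per key (a declarative comprehension, quadratic per node degree, instead of A's three hash-grouping passes).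
import Mathlib
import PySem

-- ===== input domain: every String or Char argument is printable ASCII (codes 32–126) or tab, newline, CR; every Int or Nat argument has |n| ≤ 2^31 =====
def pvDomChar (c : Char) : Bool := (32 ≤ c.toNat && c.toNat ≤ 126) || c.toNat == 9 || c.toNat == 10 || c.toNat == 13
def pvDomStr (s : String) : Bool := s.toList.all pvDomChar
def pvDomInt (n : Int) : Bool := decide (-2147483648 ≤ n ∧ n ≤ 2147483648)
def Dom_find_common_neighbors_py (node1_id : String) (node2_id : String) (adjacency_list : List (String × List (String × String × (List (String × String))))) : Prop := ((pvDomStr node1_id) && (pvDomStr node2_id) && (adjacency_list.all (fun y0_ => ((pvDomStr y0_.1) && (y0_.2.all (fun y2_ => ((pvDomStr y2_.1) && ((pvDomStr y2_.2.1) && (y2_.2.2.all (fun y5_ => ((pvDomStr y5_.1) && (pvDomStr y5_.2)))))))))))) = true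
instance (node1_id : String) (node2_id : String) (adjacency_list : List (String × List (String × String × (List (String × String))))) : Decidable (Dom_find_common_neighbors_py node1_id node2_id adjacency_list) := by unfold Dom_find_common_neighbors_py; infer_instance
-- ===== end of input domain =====

-- B builds no grouping dicts: it filters node1's ordered-deduplicated targets by membership in
-- node2's target set and recomputes each relationship list by filtering the adjacency lists per
-- key; a declarative comprehension instead of A's three hash-grouping passes (objective: alternative).

-- ===== PORT A =====
def find_common_neighbors_py (node1_id : String) (node2_id : String) (adjacency_list : List (String × List (String × String × (List (String × String))))) : List (String × List (String × List String)) :=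
  let d : PySem.Dict String (List (String × String × (List (String × String)))) := PySem.Dict.mk adjacency_list
  -- neighbors1 = {}; if node1_id in adjacency_list: for target_id, rel_type, _ in …
  let neighbors1 : PySem.Dict String (List String) :=
    if d.contains node1_id then
      (d.getD node1_id []).foldl
        (fun m e => (if m.contains e.1 then m else m.insert e.1 []).modify e.1 [] (fun v => v ++ [e.2.1]))
        PySem.Dict.empty
    else PySem.Dict.empty
  -- neighbors2 = {}; if node2_id in adjacency_list: …
  let neighbors2 : PySem.Dict String (List String) :=
    if d.contains node2_id then
      (d.getD node2_id []).foldl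
        (fun m e => (if m.contains e.1 then m else m.insert e.1 []).modify e.1 [] (fun v => v ++ [e.2.1]))
        PySem.Dict.empty
    else PySem.Dict.empty
  -- common_neighbors = {}; for neighbor_id, rel_types1 in neighbors1.items(): …
  let common : PySem.Dict String (List (String × List String)) :=
    neighbors1.items.foldl
      (fun c p =>
        if neighbors2.contains p.1 then
          c.insert p.1 [("from_node1", p.2), ("from_node2", neighbors2.getD p.1 [])]
        else c)
      PySem.Dict.empty
  common.items

-- ===== PORT B =====
def find_common_neighbors_py_alt (node1_id : String) (node2_id : String) (adjacency_list : List (String × List (String × String × (List (String × String))))) : List (String × List (String × List String)) :=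
  let d : PySem.Dict String (List (String × String × (List (String × String)))) := PySem.Dict.mk adjacency_list
  let adj1 := d.getD node1_id []
  let adj2 := d.getD node2_id []
  -- targets2 = {t for t, _, _ in adj2}
  let targets2 : PySem.Set String := PySem.Set.ofList (adj2.map (fun e => e.1))
  -- {t: {...} for t in dict.fromkeys(x for x, _, _ in adj1) if t in targets2}
  ((PySem.List.dedup (adj1.map (fun e => e.1))).filter (fun t => PySem.Set.contains targets2 t)).map
    (fun t => (t, [("from_node1", (adj1.filter (fun e => e.1 == t)).map (fun e => e.2.1)),
                   ("from_node2", (adj2.filter (fun e => e.1 == t)).map (fun e => e.2.1))]))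

-- ===== PRECONDITION & SPEC =====
def Spec_find_common_neighbors_py (node1_id : String) (node2_id : String) (adjacency_list : List (String × List (String × String × (List (String × String))))) (out : List (String × List (String × List String))) : Prop := out = find_common_neighbors_py_alt node1_id node2_id adjacency_list
instance (node1_id : String) (node2_id : String) (adjacency_list : List (String × List (String × String × (List (String × String))))) (out : List (String × List (String × List String))) : Decidable (Spec_find_common_neighbors_py node1_id node2_id adjacency_list out) := by unfold Spec_find_common_neighbors_py; infer_instance

-- ===== CLAIM (what is proved, stated in full; the proofs are below) =====
def Claim_equal_find_common_neighbors_py : Prop := ∀ (node1_id : String) (node2_id : String) (adjacency_list : List (String × List (String × String × (List (String × String))))), Dom_find_common_neighbors_py node1_id node2_id adjacency_list → Spec_find_common_neighbors_py node1_id node2_id adjacency_list (find_common_neighbors_py node1_id node2_id adjacency_list)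

-- ===== LEMMAS AND PROOFS =====

-- the grouping loop A's neighbor dicts reduce to
def pvG (l : List (String × String × (List (String × String)))) : PySem.Dict String (List String) :=
  l.foldl (fun m e => m.modify e.1 [] (fun v => v ++ [e.2.1])) PySem.Dict.empty

-- the relationship types contributed to key k by adjacency rows l
def pvRels (l : List (String × String × (List (String × String)))) (k : String) : List String :=
  (l.filter (fun e => e.1 == k)).map (fun e => e.2.1)

lemma pvG_getD (l : List (String × String × (List (String × String)))) (k : String) :
    (pvG l).getD k [] = pvRels l k := by
  have h := PySem.Dict.getD_foldl_modify_append (l.map (fun e => (e.1, e.2.1))) PySem.Dict.empty k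
  rw [List.foldl_map] at h
  simp only [pvG, pvRels]
  rw [h]
  simp [PySem.Dict.getD_empty, List.filter_map, Function.comp_def]

lemma pvG_keys (l : List (String × String × (List (String × String)))) :
    (pvG l).keys = PySem.Set.ofList (l.map (fun e => e.1)) := by
  have h := PySem.Dict.keys_foldl_modify_key l (fun e => e.1) ([] : List String)
      (fun _ e v => v ++ [e.2.1]) PySem.Dict.empty
  simpa [pvG, PySem.Dict.keys_empty, PySem.Set.ofList, PySem.Set.update] using h

lemma pvG_keys_nodup (l : List (String × String × (List (String × String)))) :
    (pvG l).keys.Nodup := by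
  rw [pvG_keys]; exact PySem.Set.nodup_ofList _

-- A's explicit "if target not in …: … = []; append" grouping step folds to pvG
lemma pv_groupA_eq (l : List (String × String × (List (String × String)))) :
    l.foldl (fun m e => (if m.contains e.1 then m else m.insert e.1 []).modify e.1 [] (fun v => v ++ [e.2.1]))
      PySem.Dict.empty = pvG l := by
  rw [pvG]
  generalize PySem.Dict.empty = acc
  induction l generalizing acc with
  | nil => rfl
  | cons e t ih =>
    simp only [List.foldl_cons]
    rw [show (if acc.contains e.1 then acc else acc.insert e.1 []).modify e.1 [] (fun v => v ++ [e.2.1])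
        = acc.modify e.1 [] (fun v => v ++ [e.2.1]) from by
          by_cases h : acc.contains e.1
          · simp [h]
          · simp only [h, Bool.false_eq_true, if_false, PySem.Dict.modify,
              PySem.Dict.getD_insert_self, PySem.Dict.insert_insert_self,
              PySem.Dict.getD_of_not_contains acc [] (by simpa using h)]]
    exact ih _

-- A's intersection loop over an items list with pairwise-distinct fresh keys appends filtered entries
lemma pv_foldA (P : String → Bool) (V : String × List String → List (String × List String))
    (items : List (String × List String)) (c : PySem.Dict String (List (String × List String)))
    (hnd : (items.map (fun p => p.1)).Nodup)
    (hfresh : ∀ p ∈ items, c.contains p.1 = false) :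
    (items.foldl (fun c p => if P p.1 then c.insert p.1 (V p) else c) c).items
      = c.items ++ (items.filter (fun p => P p.1)).map (fun p => (p.1, V p)) := by
  induction items generalizing c with
  | nil => simp
  | cons p t ih =>
    simp only [List.map_cons, List.nodup_cons] at hnd
    by_cases hp : P p.1
    · simp only [List.foldl_cons, hp, if_true, List.filter_cons, List.map_cons]
      rw [ih _ hnd.2 (fun q hq => by
        rw [PySem.Dict.contains_insert]
        have h1 : (q.1 == p.1) = false := by
          simp only [beq_eq_false_iff_ne, ne_eq]
          intro hh; exact hnd.1 (hh ▸ List.mem_map_of_mem hq)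
        simp [h1, hfresh q (List.mem_cons_of_mem _ hq)])]
      rw [PySem.Dict.items_insert_of_not_contains c (V p) (hfresh p (List.mem_cons_self ..))]
      simp
    · simp only [List.foldl_cons, hp, Bool.false_eq_true, if_false, List.filter_cons]
      rw [ih _ hnd.2 (fun q hq => hfresh q (List.mem_cons_of_mem _ hq))]

-- A's "k in neighbors2" test equals B's "t in targets2" test
lemma pvG_contains (l : List (String × String × (List (String × String)))) (k : String) :
    (pvG l).contains k = PySem.Set.contains (PySem.Set.ofList (l.map (fun e => e.1))) k := by
  rw [PySem.Dict.contains_eq_decide_mem_keys, pvG_keys]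
  simp [PySem.Set.contains, List.contains_eq_mem]

-- both ports reduce to the same filtered map over node1's deduplicated targets
lemma pv_main (n1 n2 : String) (adj : List (String × List (String × String × (List (String × String))))) :
    find_common_neighbors_py n1 n2 adj = find_common_neighbors_py_alt n1 n2 adj := by
  unfold find_common_neighbors_py find_common_neighbors_py_alt
  simp only
  set d : PySem.Dict String (List (String × String × (List (String × String)))) := PySem.Dict.mk adj with hd
  have hguard : ∀ x : String,
      (if d.contains x then
         (d.getD x []).foldl
           (fun m e => (if m.contains e.1 then m else m.insert e.1 []).modify e.1 [] (fun v => v ++ [e.2.1]))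
           PySem.Dict.empty
       else PySem.Dict.empty) = pvG (d.getD x []) := by
    intro x
    by_cases h : d.contains x
    · rw [if_pos h, pv_groupA_eq]
    · rw [if_neg h, PySem.Dict.getD_of_not_contains d [] (by simpa using h)]
      rfl
  rw [hguard, hguard]
  rw [pv_foldA _ _ _ _ (by exact pvG_keys_nodup (d.getD n1 [])) (fun p _ => PySem.Dict.contains_empty _)]
  rw [PySem.Dict.items_eq_map_keys (pvG (d.getD n1 [])) (pvG_keys_nodup _) []]
  rw [pvG_keys, List.filter_map, List.map_map, PySem.List.dedup_eq_ofList]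
  simp only [PySem.Dict.empty, List.nil_append, Function.comp_def]
  rw [show (fun x => (pvG (d.getD n2 [])).contains x)
      = (fun t => PySem.Set.contains (PySem.Set.ofList ((d.getD n2 []).map (fun e => e.1))) t)
      from funext (fun k => pvG_contains _ k)]
  apply List.map_congr_left
  intro k hk
  simp [pvG_getD, pvRels]

-- ===== VERDICT (by name: the statement is the Claim_ definition above) =====
theorem find_common_neighbors_py_spec : Claim_equal_find_common_neighbors_py := by
  intro n1 n2 adj _
  unfold Spec_find_common_neighbors_py
  exact pv_main n1 n2 adj
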